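-- pv_equiv track=rewrite | github.com/ddoddii/algorithm | python/Problems/leetcode/713.subarray-product-less-than-k.py | numSubarrayProductLessThanK3
-- ===== SOURCE A (Python) =====
-- from typing import List
--
-- def numSubarrayProductLessThanK3(nums: List[int], k: int) -> int:
--     def productLessThanK(arr: List[int], k: int) -> int:
--         res = 1
--         for a in arr:
--             res *= a
--         return res < k
--
--     q = []
--     res = set()
--
--     def dfs(idx):
--         if productLessThanK(q, k):
--             res.add(tuple(q))
--         if idx == len(nums):
--             return
--         q.append(nums[idx])
--         dfs(idx + 1)
--         q.pop()
--         dfs(idx + 1)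
--
--     dfs(0)
--
--     return len(res)
-- ===== SOURCE B (Python) =====
-- from typing import List
--
-- def numSubarrayProductLessThanK3(nums: List[int], k: int) -> int:
--     # Iterative powerset build: grow the set of distinct subsequences left to
--     # right, then count those whose product is < k.
--     subs = {()}
--     for x in nums:
--         subs |= {t + (x,) for t in subs}
--     count = 0
--     for t in subs:
--         p = 1
--         for a in t:
--             p *= a
--         if p < k:
--             count += 1
--     return count
-- ===== Notes on version B (the rewrite author's own statement) =====
-- stated objective: alternative
-- what changed: Replaced the recursive include/exclude DFS over a shared mutable prefix list with an iterative left-to-right powerset build of the set of distinct subsequences followed by a counting pass over that set.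
import Mathlib
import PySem

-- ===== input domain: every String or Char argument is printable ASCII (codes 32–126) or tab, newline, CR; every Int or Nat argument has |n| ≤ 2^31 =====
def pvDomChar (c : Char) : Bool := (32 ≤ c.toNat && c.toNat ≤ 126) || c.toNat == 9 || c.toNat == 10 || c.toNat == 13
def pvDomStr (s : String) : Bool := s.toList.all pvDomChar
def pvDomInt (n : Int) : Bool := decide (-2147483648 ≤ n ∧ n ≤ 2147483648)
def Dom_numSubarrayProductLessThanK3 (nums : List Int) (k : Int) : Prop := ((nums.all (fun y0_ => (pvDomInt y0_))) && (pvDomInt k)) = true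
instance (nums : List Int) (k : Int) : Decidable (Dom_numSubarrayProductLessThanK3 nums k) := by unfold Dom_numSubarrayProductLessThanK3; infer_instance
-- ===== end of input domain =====

-- B replaces A's recursive include/exclude DFS over a shared mutable prefix with an
-- iterative left-to-right powerset build of the subsequence set, then a counting pass
-- (objective: alternative decomposition; same exponential cost).


-- ===== PORT A =====
-- productLessThanK: res = 1; for a in arr: res *= a; return res < k
def pvProductLessThanK (arr : List Int) (k : Int) : Bool :=
  decide (arr.foldl (fun res a => res * a) 1 < k)

-- dfs(idx): structural recursion on the suffix nums[idx:], carrying the prefix q and the set res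
def pvDfs (k : Int) : List Int → List Int → PySem.Set (List Int) → PySem.Set (List Int)
  | rest, q, res =>
    let res' := if pvProductLessThanK q k then PySem.Set.add res q else res
    match rest with
    | [] => res'
    | x :: rest' => pvDfs k rest' q (pvDfs k rest' (q ++ [x]) res')

def numSubarrayProductLessThanK3 (nums : List Int) (k : Int) : Int :=
  PySem.Set.len (pvDfs k nums [] PySem.Set.empty)

-- ===== PORT B =====
-- subs |= {t + (x,) for t in subs}
def pvGrow (subs : PySem.Set (List Int)) (x : Int) : PySem.Set (List Int) :=
  PySem.Set.union subs (subs.map (fun t => t ++ [x]))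

-- p = 1; for a in t: p *= a
def pvProdB (t : List Int) : Int := t.foldl (fun p a => p * a) 1

def numSubarrayProductLessThanK3_alt (nums : List Int) (k : Int) : Int :=
  let subs := nums.foldl pvGrow (PySem.Set.ofList [[]])
  subs.foldl (fun count t => if pvProdB t < k then count + 1 else count) 0

-- ===== PRECONDITION & SPEC =====
def Spec_numSubarrayProductLessThanK3 (nums : List Int) (k : Int) (out : Int) : Prop := out = numSubarrayProductLessThanK3_alt nums k
instance (nums : List Int) (k : Int) (out : Int) : Decidable (Spec_numSubarrayProductLessThanK3 nums k out) := by unfold Spec_numSubarrayProductLessThanK3; infer_instance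

-- ===== CLAIM (what is proved, stated in full; the proofs are below) =====
def Claim_equal_numSubarrayProductLessThanK3 : Prop := ∀ (nums : List Int) (k : Int), Dom_numSubarrayProductLessThanK3 nums k → Spec_numSubarrayProductLessThanK3 nums k (numSubarrayProductLessThanK3 nums k)

-- ===== LEMMAS AND PROOFS =====

-- membership in A's per-node "add q if its product is < k" step
theorem mem_node (k : Int) (q a : List Int) (res : PySem.Set (List Int)) :
    a ∈ (if pvProductLessThanK q k then PySem.Set.add res q else res) ↔
      a ∈ res ∨ (pvProductLessThanK q k = true ∧ a = q) := by
  split_ifs with h <;> simp [PySem.Set.mem_add, h]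

-- A's dfs result set holds exactly: res plus every extension of q by a subsequence of rest whose product is < k
theorem mem_pvDfs (k : Int) (rest : List Int) : ∀ (q : List Int) (res : PySem.Set (List Int)) (a : List Int),
    a ∈ pvDfs k rest q res ↔
      a ∈ res ∨ ∃ s, List.Sublist s rest ∧ a = q ++ s ∧ pvProductLessThanK (q ++ s) k = true := by
  induction rest with
  | nil =>
    intro q res a
    rw [pvDfs]
    simp only [mem_node, List.sublist_nil]
    constructor
    · rintro (h | ⟨hp, rfl⟩)
      · exact Or.inl h
      · exact Or.inr ⟨[], rfl, by simp, by simpa using hp⟩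
    · rintro (h | ⟨s, rfl, rfl, hp⟩)
      · exact Or.inl h
      · exact Or.inr ⟨by simpa using hp, by simp⟩
  | cons x r ih =>
    intro q res a
    rw [pvDfs]
    simp only [ih, mem_node]
    constructor
    · rintro (((h | ⟨hp, rfl⟩) | ⟨s, hs, rfl, hp⟩) | ⟨s, hs, rfl, hp⟩)
      · exact Or.inl h
      · exact Or.inr ⟨[], List.nil_sublist _, by simp, by simpa using hp⟩
      · exact Or.inr ⟨x :: s, List.sublist_cons_iff.mpr (Or.inr ⟨s, rfl, hs⟩),
          by simp, by simpa [List.append_assoc] using hp⟩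
      · exact Or.inr ⟨s, hs.cons x, rfl, hp⟩
    · rintro (h | ⟨s, hs, rfl, hp⟩)
      · exact Or.inl (Or.inl (Or.inl h))
      · rcases List.sublist_cons_iff.mp hs with hs' | ⟨r', rfl, hr'⟩
        · exact Or.inr ⟨s, hs', rfl, hp⟩
        · exact Or.inl (Or.inr ⟨r', hr', by simp, by simpa [List.append_assoc] using hp⟩)

theorem nodup_pvDfs (k : Int) (rest : List Int) : ∀ (q : List Int) (res : PySem.Set (List Int)),
    res.Nodup → (pvDfs k rest q res).Nodup := by
  induction rest with
  | nil =>
    intro q res h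
    rw [pvDfs]
    split_ifs with hq
    · exact PySem.Set.nodup_add res q h
    · exact h
  | cons x r ih =>
    intro q res h
    rw [pvDfs]
    refine ih q _ (ih (q ++ [x]) _ ?_)
    split_ifs with hq
    · exact PySem.Set.nodup_add res q h
    · exact h

-- B's powerset build: every element of S extended by a subsequence of nums
theorem mem_pvGrow_foldl (nums : List Int) : ∀ (S : PySem.Set (List Int)) (a : List Int),
    a ∈ nums.foldl pvGrow S ↔ ∃ t ∈ S, ∃ s, List.Sublist s nums ∧ a = t ++ s := by
  induction nums with
  | nil =>
    intro S a
    simp [List.sublist_nil]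
  | cons x r ih =>
    intro S a
    rw [List.foldl_cons, ih]
    constructor
    · rintro ⟨t, ht, s, hs, rfl⟩
      rcases (PySem.Set.mem_union _ _ _).mp ht with ht' | ht'
      · exact ⟨t, ht', s, hs.cons x, rfl⟩
      · rcases List.mem_map.mp ht' with ⟨t0, ht0, rfl⟩
        exact ⟨t0, ht0, x :: s, List.sublist_cons_iff.mpr (Or.inr ⟨s, rfl, hs⟩),
          by simp [List.append_assoc]⟩
    · rintro ⟨t, ht, s, hs, rfl⟩
      rcases List.sublist_cons_iff.mp hs with hs' | ⟨r', rfl, hr'⟩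
      · exact ⟨t, (PySem.Set.mem_union _ _ _).mpr (Or.inl ht), s, hs', rfl⟩
      · exact ⟨t ++ [x], (PySem.Set.mem_union _ _ _).mpr
          (Or.inr (List.mem_map.mpr ⟨t, ht, rfl⟩)), r', hr', by simp [List.append_assoc]⟩

theorem nodup_pvGrow_foldl (nums : List Int) : ∀ (S : PySem.Set (List Int)),
    S.Nodup → (nums.foldl pvGrow S).Nodup := by
  induction nums with
  | nil => intro S h; exact h
  | cons x r ih => intro S h; exact ih _ (PySem.Set.nodup_union _ _ h)

-- ===== VERDICT (by name: the statement is the Claim_ definition above) =====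
theorem numSubarrayProductLessThanK3_spec : Claim_equal_numSubarrayProductLessThanK3 := by
  intro nums k _
  unfold Spec_numSubarrayProductLessThanK3 numSubarrayProductLessThanK3 numSubarrayProductLessThanK3_alt
  set LA := pvDfs k nums [] PySem.Set.empty with hLA
  set subs := nums.foldl pvGrow (PySem.Set.ofList [[]]) with hsubs
  set p : List Int → Bool := fun t => decide (pvProdB t < k) with hp
  have hA : ∀ a, a ∈ LA ↔ (List.Sublist a nums ∧ p a = true) := by
    intro a
    rw [hLA, mem_pvDfs]
    simp only [PySem.Set.empty, List.not_mem_nil, false_or, List.nil_append, hp,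
      pvProductLessThanK, pvProdB, decide_eq_true_eq]
    constructor
    · rintro ⟨s, hs, rfl, hlt⟩; exact ⟨hs, hlt⟩
    · rintro ⟨hs, hlt⟩; exact ⟨a, hs, rfl, hlt⟩
  have hB : ∀ a, a ∈ subs.filter p ↔ (List.Sublist a nums ∧ p a = true) := by
    intro a
    rw [List.mem_filter, hsubs, mem_pvGrow_foldl]
    have hof : PySem.Set.ofList ([[]] : List (List Int)) = [[]] := by decide
    simp only [hof, List.mem_singleton]
    constructor
    · rintro ⟨⟨t, rfl, s, hs, rfl⟩, hpa⟩; exact ⟨by simpa using hs, hpa⟩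
    · rintro ⟨hs, hpa⟩; exact ⟨⟨[], rfl, a, hs, by simp⟩, hpa⟩
  have hna : LA.Nodup := nodup_pvDfs k nums [] PySem.Set.empty List.nodup_nil
  have hnb : (subs.filter p).Nodup :=
    (nodup_pvGrow_foldl nums _ (PySem.Set.nodup_ofList _)).filter p
  have hlen : LA.length = (subs.filter p).length :=
    List.Perm.length_eq ((List.perm_ext_iff_of_nodup hna hnb).mpr
      (fun a => (hA a).trans (hB a).symm))
  have hcnt : subs.foldl (fun count t => if pvProdB t < k then count + 1 else count) 0
      = ((subs.filter p).length : Int) := by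
    have h1 := PySem.List.foldl_count_if p subs (0 : Int)
    have h2 : subs.foldl (fun count t => if pvProdB t < k then count + 1 else count) 0
        = subs.foldl (fun count t => if p t then count + 1 else count) (0 : Int) := by
      simp [hp]
    exact h2.trans (h1.trans (by rw [List.countP_eq_length_filter]; simp))
  simp only [PySem.Set.len, hcnt, hlen]
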